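-- pv_equiv track=rewrite | github.com/webbwr/AsciiDoctorArtisan | scripts/benchmarking/benchmark_predictive_rendering.py | simulate_edit
-- ===== SOURCE A (Python) =====
-- def simulate_edit(text: str, section_index: int, new_content: str) -> str:
--     """Simulate editing a specific section."""
--     lines = text.split("\n")
--     section_count = 0
--
--     for i, line in enumerate(lines):
--         if line.startswith("== Section"):
--             if section_count == section_index:
--                 # Insert new content after section heading
--                 lines.insert(i + 2, new_content)
--                 break
--             section_count += 1
--
--     return "\n".join(lines)
-- ===== SOURCE B (Python) =====
-- def simulate_edit(text: str, section_index: int, new_content: str) -> str: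
--     """Simulate editing a specific section (single streaming pass with a small
--     state machine; emits lines into a fresh output list, no index arithmetic
--     and no list mutation at an index)."""
--     out = []
--     remaining = section_index
--     pending = -1  # -1: still searching; >0: lines left to emit before inserting; 0: done
--     for line in text.split("\n"):
--         out.append(line)
--         if pending > 0:
--             pending -= 1
--             if pending == 0:
--                 out.append(new_content)
--         elif pending < 0 and line.startswith("== Section"):
--             if remaining == 0:
--                 pending = 1
--             else:
--                 remaining -= 1
--     if pending > 0:
--         out.append(new_content)
--     return "\n".join(out)
-- ===== Notes on version B (the rewrite author's own statement) =====
-- stated objective: alternative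
-- what changed: Replaces A's find-index-then-mutate scan (enumerate, count headings, list.insert at i+2, break) with a single streaming pass: lines are emitted into a fresh output list under a small state machine (searching / lines-left-before-insert / done), so no index arithmetic and no in-place insertion occur.
import Mathlib
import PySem

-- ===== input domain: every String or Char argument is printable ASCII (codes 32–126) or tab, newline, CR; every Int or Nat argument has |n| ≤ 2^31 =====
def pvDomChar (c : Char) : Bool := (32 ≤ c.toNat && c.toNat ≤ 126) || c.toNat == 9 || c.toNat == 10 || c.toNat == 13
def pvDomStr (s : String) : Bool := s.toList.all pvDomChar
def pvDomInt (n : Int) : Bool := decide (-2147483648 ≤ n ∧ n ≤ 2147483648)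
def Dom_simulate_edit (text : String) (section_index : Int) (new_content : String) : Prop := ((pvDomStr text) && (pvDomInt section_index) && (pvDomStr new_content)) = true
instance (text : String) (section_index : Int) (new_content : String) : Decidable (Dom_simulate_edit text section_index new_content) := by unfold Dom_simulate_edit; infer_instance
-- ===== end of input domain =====

-- B replaces A's find-index-then-mutate scan by a single streaming pass with a small state
-- machine that emits lines into a fresh output list; objective: alternative (same cost).
-- Return-value equivalence only (A mutates its local list, not an argument).

-- ===== PORT A =====
-- the for-loop of A: scans enumerate(lines) carrying section_count; on the matching heading
-- inserts into the full list and breaks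
def simulateEditLoopA (lines : List String) (si : Int) (nc : String) :
    List (Int × String) → Int → List String
  | [], _ => lines
  | (i, line) :: rest, cnt =>
    if PySem.Str.startswith line "== Section" then
      if cnt = si then PySem.List.insert lines (i + 2) nc
      else simulateEditLoopA lines si nc rest (cnt + 1)
    else simulateEditLoopA lines si nc rest cnt

def simulate_edit (text : String) (section_index : Int) (new_content : String) : String :=
  let lines := (PySem.Str.split? text "\n").getD []   -- sep "\n" ≠ "" so split? is always some
  PySem.Str.join "\n" (simulateEditLoopA lines section_index new_content (PySem.List.enumerate lines) 0)

-- ===== PORT B =====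
-- one step of B's state machine: state = (output so far, remaining, pending)
def simEditStepB (nc : String) (st : List String × Int × Int) (line : String) :
    List String × Int × Int :=
  match st with
  | (out, rem, pending) =>
    let out' := out ++ [line]
    if 0 < pending then
      let pending' := pending - 1
      if pending' = 0 then (out' ++ [nc], rem, pending')
      else (out', rem, pending')
    else if pending < 0 ∧ PySem.Str.startswith line "== Section" then
      if rem = 0 then (out', rem, 1) else (out', rem - 1, pending)
    else (out', rem, pending)

def simulate_edit_alt (text : String) (section_index : Int) (new_content : String) : String :=
  let lines := (PySem.Str.split? text "\n").getD []   -- sep "\n" ≠ "" so split? is always some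
  let st := lines.foldl (simEditStepB new_content) ([], section_index, -1)
  let out := if 0 < st.2.2 then st.1 ++ [new_content] else st.1
  PySem.Str.join "\n" out

-- ===== PRECONDITION & SPEC =====
def Spec_simulate_edit (text : String) (section_index : Int) (new_content : String) (out : String) : Prop := out = simulate_edit_alt text section_index new_content
instance (text : String) (section_index : Int) (new_content : String) (out : String) : Decidable (Spec_simulate_edit text section_index new_content out) := by unfold Spec_simulate_edit; infer_instance

-- ===== CLAIM (what is proved, stated in full; the proofs are below) =====
def Claim_equal_simulate_edit : Prop := ∀ (text : String) (section_index : Int) (new_content : String), Dom_simulate_edit text section_index new_content → Spec_simulate_edit text section_index new_content (simulate_edit text section_index new_content)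

-- ===== LEMMAS AND PROOFS =====

-- heading predicate on an (index, line) pair
def pvPred (p : Int × String) : Option Int :=
  if PySem.Str.startswith p.2 "== Section" then some p.1 else none

-- heading indices of an enumerated pair list / of a line list enumerated from k / from 0
def pvHsP (es : List (Int × String)) : List Int := es.filterMap pvPred
def pvHsFrom (ls : List String) (k : Int) : List Int := pvHsP (PySem.List.enumerate ls k)
def pvHs (ls : List String) : List Int := pvHsFrom ls 0

-- the common closed form both programs are reduced to
def pvClosed (ls : List String) (si : Int) (nc : String) : List String :=
  if 0 ≤ si ∧ si.toNat < (pvHs ls).length then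
    PySem.List.insert ls ((pvHs ls).getD si.toNat 0 + 2) nc
  else ls

-- "emit one more line, then the new content" (B's pending = 1 phase)
def pvPlace (nc : String) : List String → List String
  | [] => [nc]
  | x :: xs => x :: nc :: xs

-- B's fold together with its trailing append
def pvRunB (nc : String) (ls : List String) (st : List String × Int × Int) : List String :=
  let st' := ls.foldl (simEditStepB nc) st
  if 0 < st'.2.2 then st'.1 ++ [nc] else st'.1

theorem pvHsP_cons_match (i : Int) (line : String) (rest : List (Int × String))
    (hl : PySem.Str.startswith line "== Section" = true) :
    pvHsP ((i, line) :: rest) = i :: pvHsP rest := by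
  unfold pvHsP
  exact List.filterMap_cons_some (show pvPred (i, line) = some i from by
    unfold pvPred; rw [if_pos hl])

theorem pvHsP_cons_nomatch (i : Int) (line : String) (rest : List (Int × String))
    (hl : ¬ PySem.Str.startswith line "== Section" = true) :
    pvHsP ((i, line) :: rest) = pvHsP rest := by
  unfold pvHsP
  exact List.filterMap_cons_none (show pvPred (i, line) = none from by
    unfold pvPred; rw [if_neg hl])

theorem pvHsFrom_cons_match (l : String) (ls : List String) (k : Int)
    (hl : PySem.Str.startswith l "== Section" = true) :
    pvHsFrom (l :: ls) k = k :: pvHsFrom ls (k + 1) := by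
  unfold pvHsFrom
  simp only [PySem.List.enumerate]
  exact pvHsP_cons_match k l _ hl

theorem pvHsFrom_cons_nomatch (l : String) (ls : List String) (k : Int)
    (hl : ¬ PySem.Str.startswith l "== Section" = true) :
    pvHsFrom (l :: ls) k = pvHsFrom ls (k + 1) := by
  unfold pvHsFrom
  simp only [PySem.List.enumerate]
  exact pvHsP_cons_nomatch k l _ hl

theorem pvHsFrom_shift (ls : List String) :
    ∀ k : Int, pvHsFrom ls k = (pvHsFrom ls 0).map (fun x => x + k) := by
  induction ls with
  | nil => intro k; simp [pvHsFrom, pvHsP, PySem.List.enumerate]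
  | cons l t ih =>
    intro k
    by_cases hl : PySem.Str.startswith l "== Section" = true
    · rw [pvHsFrom_cons_match l t k hl, pvHsFrom_cons_match l t 0 hl, List.map_cons,
        ih (k + 1), ih (0 + 1), List.map_map]
      congr 1
      · omega
      · congr 1; funext x; simp; ring
    · rw [pvHsFrom_cons_nomatch l t k hl, pvHsFrom_cons_nomatch l t 0 hl,
        ih (k + 1), ih (0 + 1), List.map_map]
      congr 1; funext x; simp; ring

theorem pvHs_cons_match (l : String) (ls : List String)
    (hl : PySem.Str.startswith l "== Section" = true) :
    pvHs (l :: ls) = 0 :: (pvHs ls).map (fun x => x + 1) := by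
  unfold pvHs
  rw [pvHsFrom_cons_match l ls 0 hl, pvHsFrom_shift ls (0 + 1)]
  norm_num

theorem pvHs_cons_nomatch (l : String) (ls : List String)
    (hl : ¬ PySem.Str.startswith l "== Section" = true) :
    pvHs (l :: ls) = (pvHs ls).map (fun x => x + 1) := by
  unfold pvHs
  rw [pvHsFrom_cons_nomatch l ls 0 hl, pvHsFrom_shift ls (0 + 1)]
  norm_num

theorem pvHs_nonneg (ls : List String) : ∀ i ∈ pvHs ls, 0 ≤ i := by
  induction ls with
  | nil => intro i hi; simp [pvHs, pvHsFrom, pvHsP, PySem.List.enumerate] at hi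
  | cons l t ih =>
    intro i hi
    by_cases hl : PySem.Str.startswith l "== Section" = true
    · rw [pvHs_cons_match l t hl] at hi
      rw [List.mem_cons] at hi
      rcases hi with hi | hi
      · omega
      · rcases List.mem_map.mp hi with ⟨j, hj, rfl⟩
        have := ih j hj; omega
    · rw [pvHs_cons_nomatch l t hl] at hi
      rcases List.mem_map.mp hi with ⟨j, hj, rfl⟩
      have := ih j hj; omega

theorem pvInsert_nonneg {α : Type} (xs : List α) (i : Int) (v : α) (h : 0 ≤ i) :
    PySem.List.insert xs i v = xs.take i.toNat ++ v :: xs.drop i.toNat := by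
  unfold PySem.List.insert PySem.List.sliceIndices
  have h1 : ¬ ((1 : Int) < 0) := by omega
  simp only [h1, if_false]
  have h2 : ¬ (i < 0) := by omega
  simp only [h2, if_false]
  have h3 : (min i (xs.length : Int)).toNat = min i.toNat xs.length := by omega
  simp only [h3]
  by_cases hle : i.toNat ≤ xs.length
  · rw [min_eq_left hle]
  · have hge : xs.length ≤ i.toNat := by omega
    rw [min_eq_right hge, List.take_length,
        List.take_of_length_le hge, List.drop_length, List.drop_of_length_le hge]

theorem pvInsert_cons_succ {α : Type} (x : α) (xs : List α) (n : Int) (v : α) (h : 0 ≤ n) :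
    PySem.List.insert (x :: xs) (n + 1) v = x :: PySem.List.insert xs n v := by
  rw [pvInsert_nonneg _ _ _ (by omega), pvInsert_nonneg _ _ _ h]
  have hn : (n + 1).toNat = n.toNat + 1 := by omega
  rw [hn, List.take_succ_cons, List.drop_succ_cons]
  rfl

theorem pvInsert_two_place (l : String) (ls : List String) (nc : String) :
    PySem.List.insert (l :: ls) 2 nc = l :: pvPlace nc ls := by
  rw [show (2 : Int) = 1 + 1 from by norm_num,
      pvInsert_cons_succ _ _ _ _ (by norm_num)]
  cases ls with
  | nil => rw [pvInsert_nonneg _ _ _ (by norm_num)]; rfl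
  | cons y ys =>
    rw [show (1 : Int) = 0 + 1 from by norm_num,
        pvInsert_cons_succ _ _ _ _ (le_refl 0),
        pvInsert_nonneg _ _ _ (le_refl 0)]
    rfl

theorem pvGetD_map_add_one (m : List Int) (n : Nat) (hin : n < m.length) :
    (m.map (fun x => x + 1)).getD n 0 = m.getD n 0 + 1 := by
  rw [List.getD_eq_getElem _ _ (by simpa using hin), List.getD_eq_getElem _ _ hin,
      List.getElem_map]

theorem pvGetD_mem (m : List Int) (n : Nat) (hin : n < m.length) : m.getD n 0 ∈ m := by
  rw [List.getD_eq_getElem _ _ hin]; exact List.getElem_mem hin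

-- unfoldings of one step of B's state machine
theorem pvStep_done (nc l : String) (out : List String) (rem : Int) :
    simEditStepB nc (out, rem, 0) l = (out ++ [l], rem, 0) := by
  simp only [simEditStepB]
  rw [if_neg (by norm_num : ¬ ((0 : Int) < 0)),
      if_neg (fun h : (0 : Int) < 0 ∧ _ => absurd h.1 (by norm_num))]

theorem pvStep_pending1 (nc l : String) (out : List String) (rem : Int) :
    simEditStepB nc (out, rem, 1) l = (out ++ [l] ++ [nc], rem, 0) := by
  simp only [simEditStepB]
  rw [if_pos (by norm_num : (0 : Int) < 1), if_pos (by norm_num : (1 : Int) - 1 = 0)]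
  norm_num

theorem pvStep_search_match_zero (nc l : String) (out : List String)
    (hl : PySem.Str.startswith l "== Section" = true) :
    simEditStepB nc (out, 0, -1) l = (out ++ [l], 0, 1) := by
  simp only [simEditStepB]
  rw [if_neg (by norm_num : ¬ ((0 : Int) < -1)),
      if_pos (⟨by norm_num, hl⟩ : (-1 : Int) < 0 ∧ _)]
  simp

theorem pvStep_search_match (nc l : String) (out : List String) (rem : Int)
    (hl : PySem.Str.startswith l "== Section" = true) (hr : rem ≠ 0) :
    simEditStepB nc (out, rem, -1) l = (out ++ [l], rem - 1, -1) := by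
  simp only [simEditStepB]
  rw [if_neg (by norm_num : ¬ ((0 : Int) < -1)),
      if_pos (⟨by norm_num, hl⟩ : (-1 : Int) < 0 ∧ _), if_neg hr]

theorem pvStep_search_nomatch (nc l : String) (out : List String) (rem : Int)
    (hl : ¬ PySem.Str.startswith l "== Section" = true) :
    simEditStepB nc (out, rem, -1) l = (out ++ [l], rem, -1) := by
  simp only [simEditStepB]
  rw [if_neg (by norm_num : ¬ ((0 : Int) < -1)),
      if_neg (fun h : (-1 : Int) < 0 ∧ _ => hl h.2)]

-- cons equations of the closed form
theorem pvClosed_cons_match_zero (l : String) (t : List String) (nc : String)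
    (hl : PySem.Str.startswith l "== Section" = true) :
    pvClosed (l :: t) 0 nc = l :: pvPlace nc t := by
  unfold pvClosed
  rw [pvHs_cons_match l t hl]
  rw [if_pos ⟨le_refl 0, by simp⟩]
  rw [show ((0 : Int)).toNat = 0 from rfl, List.getD_cons_zero,
      show (0 : Int) + 2 = 2 from by norm_num]
  exact pvInsert_two_place l t nc

theorem pvClosed_cons_match (l : String) (t : List String) (rem : Int) (nc : String)
    (hl : PySem.Str.startswith l "== Section" = true) (hr : rem ≠ 0) :
    pvClosed (l :: t) rem nc = l :: pvClosed t (rem - 1) nc := by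
  unfold pvClosed
  rw [pvHs_cons_match l t hl]
  have hlen : ((0 : Int) :: (pvHs t).map (fun x => x + 1)).length = (pvHs t).length + 1 := by
    simp
  by_cases hc : 0 ≤ rem - 1 ∧ (rem - 1).toNat < (pvHs t).length
  · have hc2 : 0 ≤ rem ∧ rem.toNat < ((0 : Int) :: (pvHs t).map (fun x => x + 1)).length := by
      rw [hlen]; omega
    rw [if_pos hc2, if_pos hc,
        show rem.toNat = (rem - 1).toNat + 1 from by omega,
        List.getD_cons_succ, pvGetD_map_add_one _ _ hc.2]
    have hnn : 0 ≤ (pvHs t).getD (rem - 1).toNat 0 :=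
      pvHs_nonneg t _ (pvGetD_mem _ _ hc.2)
    rw [show (pvHs t).getD (rem - 1).toNat 0 + 1 + 2 =
          ((pvHs t).getD (rem - 1).toNat 0 + 2) + 1 from by ring,
        pvInsert_cons_succ _ _ _ _ (by omega)]
  · have hc2 : ¬ (0 ≤ rem ∧ rem.toNat < ((0 : Int) :: (pvHs t).map (fun x => x + 1)).length) := by
      rw [hlen]; omega
    rw [if_neg hc2, if_neg hc]

theorem pvClosed_cons_nomatch (l : String) (t : List String) (rem : Int) (nc : String)
    (hl : ¬ PySem.Str.startswith l "== Section" = true) :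
    pvClosed (l :: t) rem nc = l :: pvClosed t rem nc := by
  unfold pvClosed
  rw [pvHs_cons_nomatch l t hl]
  have hlen : ((pvHs t).map (fun x => x + 1)).length = (pvHs t).length := by simp
  by_cases hc : 0 ≤ rem ∧ rem.toNat < (pvHs t).length
  · have hc2 : 0 ≤ rem ∧ rem.toNat < ((pvHs t).map (fun x => x + 1)).length := by
      rw [hlen]; exact hc
    rw [if_pos hc2, if_pos hc, pvGetD_map_add_one _ _ hc.2]
    have hnn : 0 ≤ (pvHs t).getD rem.toNat 0 :=
      pvHs_nonneg t _ (pvGetD_mem _ _ hc.2)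
    rw [show (pvHs t).getD rem.toNat 0 + 1 + 2 =
          ((pvHs t).getD rem.toNat 0 + 2) + 1 from by ring,
        pvInsert_cons_succ _ _ _ _ (by omega)]
  · have hc2 : ¬ (0 ≤ rem ∧ rem.toNat < ((pvHs t).map (fun x => x + 1)).length) := by
      rw [hlen]; exact hc
    rw [if_neg hc2, if_neg hc]

-- B's run after the insertion is done: it just copies the remaining lines
theorem pvRunB_done (nc : String) (ls : List String) :
    ∀ out rem, pvRunB nc ls (out, rem, 0) = out ++ ls := by
  induction ls with
  | nil => intro out rem; simp [pvRunB]
  | cons l t ih =>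
    intro out rem
    simp only [pvRunB, List.foldl_cons, pvStep_done]
    have := ih (out ++ [l]) rem
    simp only [pvRunB] at this
    rw [this, List.append_assoc]
    rfl

-- B's run in the "one more line, then insert" phase
theorem pvRunB_pending1 (nc : String) (ls : List String) :
    ∀ out rem, pvRunB nc ls (out, rem, 1) = out ++ pvPlace nc ls := by
  cases ls with
  | nil => intro out rem; simp [pvRunB, pvPlace]
  | cons l t =>
    intro out rem
    simp only [pvRunB, List.foldl_cons, pvStep_pending1]
    have := pvRunB_done nc t (out ++ [l] ++ [nc]) rem
    simp only [pvRunB] at this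
    rw [this]
    simp [pvPlace]

-- B's run while still searching equals the closed form
theorem pvRunB_search (nc : String) (ls : List String) :
    ∀ out rem, pvRunB nc ls (out, rem, -1) = out ++ pvClosed ls rem nc := by
  induction ls with
  | nil =>
    intro out rem
    have h : pvClosed [] rem nc = [] := by
      unfold pvClosed
      rw [if_neg (by simp [pvHs, pvHsFrom, pvHsP, PySem.List.enumerate])]
    rw [h]
    simp [pvRunB]
  | cons l t ih =>
    intro out rem
    by_cases hl : PySem.Str.startswith l "== Section" = true
    · by_cases hr : rem = 0
      · subst hr
        simp only [pvRunB, List.foldl_cons, pvStep_search_match_zero nc l out hl]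
        have := pvRunB_pending1 nc t (out ++ [l]) 0
        simp only [pvRunB] at this
        rw [this, pvClosed_cons_match_zero l t nc hl, List.append_assoc]
        rfl
      · simp only [pvRunB, List.foldl_cons, pvStep_search_match nc l out rem hl hr]
        have := ih (out ++ [l]) (rem - 1)
        simp only [pvRunB] at this
        rw [this, pvClosed_cons_match l t rem nc hl hr, List.append_assoc]
        rfl
    · simp only [pvRunB, List.foldl_cons, pvStep_search_nomatch nc l out rem hl]
      have := ih (out ++ [l]) rem
      simp only [pvRunB] at this
      rw [this, pvClosed_cons_nomatch l t rem nc hl, List.append_assoc]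
      rfl

-- invariant of A's loop: with section_count = cnt, the loop over the remaining pairs es
-- inserts after the (si - cnt)-th heading of es, if any
theorem simulateEditLoopA_eq (lines : List String) (si : Int) (nc : String) :
    ∀ (es : List (Int × String)) (cnt : Int),
      simulateEditLoopA lines si nc es cnt =
        if 0 ≤ si - cnt ∧ (si - cnt).toNat < (pvHsP es).length then
          PySem.List.insert lines ((pvHsP es).getD (si - cnt).toNat 0 + 2) nc
        else lines := by
  intro es
  induction es with
  | nil =>
    intro cnt
    rw [if_neg (by simp [pvHsP] : ¬ (0 ≤ si - cnt ∧ (si - cnt).toNat < (pvHsP ([] : List (Int × String))).length))]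
    rfl
  | cons p rest ih =>
    intro cnt
    obtain ⟨i, line⟩ := p
    by_cases hsw : PySem.Str.startswith line "== Section" = true
    · by_cases hc : cnt = si
      · subst hc
        simp only [simulateEditLoopA]
        rw [if_pos hsw, if_pos trivial, pvHsP_cons_match i line rest hsw]
        rw [if_pos ⟨by omega, by rw [List.length_cons]; omega⟩,
            show (cnt - cnt).toNat = 0 from by omega, List.getD_cons_zero]
      · simp only [simulateEditLoopA]
        rw [if_pos hsw, if_neg hc, ih (cnt + 1), pvHsP_cons_match i line rest hsw]
        by_cases hcond : 0 ≤ si - (cnt + 1) ∧ (si - (cnt + 1)).toNat < (pvHsP rest).length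
        · have hcond2 : 0 ≤ si - cnt ∧ (si - cnt).toNat < (i :: pvHsP rest).length := by
            rw [List.length_cons]; omega
          rw [if_pos hcond, if_pos hcond2,
              show (si - cnt).toNat = (si - (cnt + 1)).toNat + 1 from by omega,
              List.getD_cons_succ]
        · have hcond2 : ¬ (0 ≤ si - cnt ∧ (si - cnt).toNat < (i :: pvHsP rest).length) := by
            rw [List.length_cons]; omega
          rw [if_neg hcond, if_neg hcond2]
    · simp only [simulateEditLoopA]
      rw [if_neg hsw, ih cnt, pvHsP_cons_nomatch i line rest hsw]

-- ===== VERDICT (by name: the statement is the Claim_ definition above) =====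
theorem simulate_edit_spec : Claim_equal_simulate_edit := by
  intro text si nc _
  unfold Spec_simulate_edit simulate_edit simulate_edit_alt
  show PySem.Str.join "\n"
      (simulateEditLoopA ((PySem.Str.split? text "\n").getD []) si nc
        (PySem.List.enumerate ((PySem.Str.split? text "\n").getD [])) 0) =
    PySem.Str.join "\n" (pvRunB nc ((PySem.Str.split? text "\n").getD []) ([], si, -1))
  rw [pvRunB_search nc _ [] si, List.nil_append, simulateEditLoopA_eq]
  congr 1
  unfold pvClosed pvHs pvHsFrom
  rw [show si - 0 = si from by ring]
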